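-- pv_equiv track=rewrite | github.com/marinsokol5/ppj_lab | lab2_python/source/Util.py | get_starting_signs
-- ===== SOURCE A (Python) =====
-- from collections import defaultdict, OrderedDict
-- from operator import or_
-- from functools import reduce
--
-- def get_starting_signs(dict_of_direct_signs: defaultdict):
--     size = 0
--     pom_dict = dict_of_direct_signs.copy()
--     while True:
--         pom = {
--             sign: reduce(or_, [direct_signs] + [pom_dict[pom] for pom in direct_signs if
--                                                 pom in pom_dict])
--             for sign, direct_signs in pom_dict.items()
--         }
--         pom_size = sum([len(values) for values in pom.values()])
--         if pom_size == size:
--             break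
--         size = pom_size
--         pom_dict = pom
--     return pom
-- ===== SOURCE B (Python) =====
-- def get_starting_signs(dict_of_direct_signs):
--     result = {}
--     for sign, direct in dict_of_direct_signs.items():
--         reach = set(direct)
--         frontier = set(direct)
--         while frontier:
--             nxt = set()
--             for p in frontier:
--                 if p in dict_of_direct_signs:
--                     nxt |= dict_of_direct_signs[p]
--             frontier = nxt - reach
--             reach = reach | nxt
--         result[sign] = reach
--     return result
-- ===== Notes on version B (the rewrite author's own statement) =====
-- stated objective: faster
-- what changed: A repeatedly rebuilds the whole dict by unioning each sign's current set with the current sets of all its members until the total size stabilises (a global squaring fixpoint); B instead runs an independent frontier-based BFS per key over the original adjacency, expanding each discovered sign once.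
import Mathlib
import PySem

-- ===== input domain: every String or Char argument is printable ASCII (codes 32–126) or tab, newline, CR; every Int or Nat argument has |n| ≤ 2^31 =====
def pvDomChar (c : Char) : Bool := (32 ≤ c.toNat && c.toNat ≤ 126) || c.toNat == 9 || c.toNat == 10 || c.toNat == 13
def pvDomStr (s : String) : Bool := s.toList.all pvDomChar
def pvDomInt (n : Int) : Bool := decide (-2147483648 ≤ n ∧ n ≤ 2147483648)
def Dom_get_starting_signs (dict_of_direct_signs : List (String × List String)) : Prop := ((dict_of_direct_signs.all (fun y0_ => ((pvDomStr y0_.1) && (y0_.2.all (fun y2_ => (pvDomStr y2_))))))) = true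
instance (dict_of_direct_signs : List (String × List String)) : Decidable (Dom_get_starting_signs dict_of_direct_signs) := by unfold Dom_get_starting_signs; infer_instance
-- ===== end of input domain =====

-- B replaces A's global squaring fixpoint over the whole dict by an independent
-- frontier-based BFS per key (each adjacency set is expanded once per source).


-- ===== PORT A =====
-- reduce(or_, [direct_signs] + [pom_dict[p] for p in direct_signs if p in pom_dict])
-- (reduce over a nonempty list = fold the tail starting from the head).
def pvReduceA (pd : PySem.Dict String (List String)) (direct_signs : List String) : List String :=
  (((direct_signs.filter (fun p => pd.contains p)).map (fun p => pd.getD p []))).foldl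
    PySem.Set.union direct_signs

-- pom = {sign: reduce(...) for sign, direct_signs in pom_dict.items()}
def pvStepA (pd : PySem.Dict String (List String)) : PySem.Dict String (List String) :=
  PySem.Dict.ofList (pd.items.map (fun sv => (sv.1, pvReduceA pd sv.2)))

-- pom_size = sum([len(values) for values in pom.values()])
def pvSizeA (pd : PySem.Dict String (List String)) : Int :=
  (pd.values.map (fun v => PySem.Set.len v)).sum

-- the while-True loop; fuel is a termination artifact only (proved sufficient below)
def pvLoopA : Nat → Int → PySem.Dict String (List String) → PySem.Dict String (List String)
  | fuel, size, pd =>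
    let pom := pvStepA pd
    let pomSize := pvSizeA pom
    if pomSize == size then pom
    else
      match fuel with
      | 0 => pom
      | Nat.succ f => pvLoopA f pomSize pom

-- fuel bound (Lean-side artifact, not part of the Python)
def pvFuelA (l : List (String × List String)) : Nat :=
  ((PySem.Dict.ofList l).items.map
    (fun sv => sv.2.length + ((PySem.Dict.ofList l).items.flatMap (fun sv => sv.2)).length)).sum + 2

def get_starting_signs (dict_of_direct_signs : List (String × List String)) : List (String × List String) :=
  (pvLoopA (pvFuelA dict_of_direct_signs) 0 (PySem.Dict.ofList dict_of_direct_signs)).items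

-- ===== PORT B =====
-- the while-frontier loop of Source B; fuel is a termination artifact only (proved sufficient below)
def pvBfsB (d : PySem.Dict String (List String)) : Nat → List String → List String → List String
  | 0, reach, _ => reach
  | Nat.succ f, reach, frontier =>
    if frontier.isEmpty then reach
    else
      -- nxt = set(); for p in frontier: if p in dict: nxt |= dict[p]
      let nxt := frontier.foldl
        (fun a p => if d.contains p then PySem.Set.union a (d.getD p []) else a) PySem.Set.empty
      -- frontier = nxt - reach; reach = reach | nxt
      pvBfsB d f (PySem.Set.union reach nxt) (PySem.Set.diff nxt reach)

def pvFuelB (d : PySem.Dict String (List String)) (ds : List String) : Nat :=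
  ds.length + (d.items.flatMap (fun sv => sv.2)).length + 2

def get_starting_signs_alt (dict_of_direct_signs : List (String × List String)) : List (String × List String) :=
  let d := PySem.Dict.ofList dict_of_direct_signs
  -- result[sign] = reach for each (sign, direct) of the dict, reach/frontier starting as (a copy of) the set direct
  d.items.map (fun sv => (sv.1, pvBfsB d (pvFuelB d sv.2) sv.2 sv.2))

-- ===== PRECONDITION & SPEC =====
def Spec_get_starting_signs (dict_of_direct_signs : List (String × List String)) (out : List (String × List String)) : Prop := out = get_starting_signs_alt dict_of_direct_signs
instance (dict_of_direct_signs : List (String × List String)) (out : List (String × List String)) : Decidable (Spec_get_starting_signs dict_of_direct_signs out) := by unfold Spec_get_starting_signs; infer_instance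

-- ===== CLAIM (what is proved, stated in full; the proofs are below) =====
def Claim_equal_get_starting_signs : Prop := ∀ (dict_of_direct_signs : List (String × List String)), Dom_get_starting_signs dict_of_direct_signs → Spec_get_starting_signs dict_of_direct_signs (get_starting_signs dict_of_direct_signs)

-- ===== LEMMAS AND PROOFS =====

-- ---------- ordered-set (insertion-order) algebra ----------

theorem pv_upd_cons {α : Type} [BEq α] (A : List α) (c : α) (C : List α) :
    PySem.Set.update A (c :: C) = PySem.Set.update (PySem.Set.add A c) C := rfl

theorem pv_upd_append {α : Type} [BEq α] (A B C : List α) :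
    PySem.Set.update A (B ++ C) = PySem.Set.update (PySem.Set.update A B) C := by
  simp [PySem.Set.update, List.foldl_append]

theorem pv_upd_add {α : Type} [BEq α] [LawfulBEq α] (A B : List α) (c : α) :
    PySem.Set.update A (PySem.Set.add B c) = PySem.Set.add (PySem.Set.update A B) c := by
  by_cases h : c ∈ B
  · rw [PySem.Set.add_of_mem h, PySem.Set.add_of_mem ((PySem.Set.mem_update A B c).mpr (Or.inr h))]
  · rw [PySem.Set.add_of_not_mem h, pv_upd_append]
    rfl

theorem pv_upd_assoc {α : Type} [BEq α] [LawfulBEq α] (A B C : List α) :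
    PySem.Set.update A (PySem.Set.update B C) = PySem.Set.update (PySem.Set.update A B) C := by
  induction C generalizing B with
  | nil => rfl
  | cons c C ih =>
    rw [pv_upd_cons B c C, ih, pv_upd_add, pv_upd_cons]

theorem pv_upd_sub {α : Type} [BEq α] [LawfulBEq α] (A C : List α) (h : ∀ x ∈ C, x ∈ A) :
    PySem.Set.update A C = A := by
  induction C generalizing A with
  | nil => rfl
  | cons c C ih =>
    rw [pv_upd_cons, PySem.Set.add_of_mem (h c (List.mem_cons_self))]
    exact ih A (fun x hx => h x (List.mem_cons_of_mem _ hx))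

theorem pv_upd_prefix {α : Type} [BEq α] (A B : List α) : A <+: PySem.Set.update A B := by
  induction B generalizing A with
  | nil => exact List.prefix_refl A
  | cons c C ih =>
    rw [pv_upd_cons]
    refine List.IsPrefix.trans ?_ (ih (PySem.Set.add A c))
    unfold PySem.Set.add
    split
    · exact List.prefix_refl A
    · exact List.prefix_append A [c]

theorem pv_foldl_update {α β : Type} [BEq α] (P : List β) (g : β → List α) (A : List α) :
    P.foldl (fun a p => PySem.Set.update a (g p)) A = PySem.Set.update A (P.flatMap g) := by
  induction P generalizing A with
  | nil => simp
  | cons p P ih =>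
    simp only [List.foldl_cons, List.flatMap_cons, pv_upd_append]
    exact ih _

-- the fresh elements that `update A ws` appends after A
def pvNews {α : Type} [BEq α] (A ws : List α) : List α := (PySem.Set.update A ws).drop A.length

theorem pv_upd_eq_append_news {α : Type} [BEq α] (A ws : List α) :
    PySem.Set.update A ws = A ++ pvNews A ws := by
  obtain ⟨t, ht⟩ := pv_upd_prefix A ws
  rw [pvNews, ← ht, List.drop_left]

theorem pv_news_cons_mem {α : Type} [BEq α] [LawfulBEq α] {A : List α} {c : α} (h : c ∈ A) (ws : List α) :
    pvNews A (c :: ws) = pvNews A ws := by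
  unfold pvNews
  rw [pv_upd_cons, PySem.Set.add_of_mem h]

theorem pv_news_cons_not_mem {α : Type} [BEq α] [LawfulBEq α] {A : List α} {c : α} (h : c ∉ A) (ws : List α) :
    pvNews A (c :: ws) = c :: pvNews (A ++ [c]) ws := by
  have h1 : PySem.Set.update A (c :: ws) = A ++ ([c] ++ pvNews (A ++ [c]) ws) := by
    rw [pv_upd_cons, PySem.Set.add_of_not_mem h, pv_upd_eq_append_news (A ++ [c]) ws,
        List.append_assoc]
  show (PySem.Set.update A (c :: ws)).drop A.length = _
  rw [h1, List.drop_left]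
  rfl

theorem pv_mem_news {α : Type} [BEq α] [LawfulBEq α] {A ws : List α} {x : α} :
    x ∈ pvNews A ws ↔ x ∈ ws ∧ x ∉ A := by
  induction ws generalizing A with
  | nil => simp [pvNews, List.drop_length]
  | cons w ws ih =>
    by_cases hw : w ∈ A
    · rw [pv_news_cons_mem hw]
      rw [ih]
      constructor
      · rintro ⟨h1, h2⟩; exact ⟨List.mem_cons_of_mem _ h1, h2⟩
      · rintro ⟨h1, h2⟩
        rcases List.mem_cons.mp h1 with h | h
        · exact absurd (h ▸ hw) h2
        · exact ⟨h, h2⟩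
    · rw [pv_news_cons_not_mem hw]
      rw [List.mem_cons, ih]
      constructor
      · rintro (rfl | ⟨h1, h2⟩)
        · exact ⟨List.mem_cons_self, hw⟩
        · refine ⟨List.mem_cons_of_mem _ h1, fun hx => h2 (List.mem_append_left _ hx)⟩
      · rintro ⟨h1, h2⟩
        rcases List.mem_cons.mp h1 with rfl | h
        · exact Or.inl rfl
        · by_cases hxw : x = w
          · exact Or.inl hxw
          · refine Or.inr ⟨h, fun hx => ?_⟩
            rcases List.mem_append.mp hx with hx | hx
            · exact h2 hx
            · exact hxw (List.mem_singleton.mp hx)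

theorem pv_news_nodup {α : Type} [BEq α] [LawfulBEq α] (A ws : List α) : (pvNews A ws).Nodup := by
  induction ws generalizing A with
  | nil => simp [pvNews, List.drop_length]
  | cons w ws ih =>
    by_cases hw : w ∈ A
    · rw [pv_news_cons_mem hw]; exact ih A
    · rw [pv_news_cons_not_mem hw]
      refine List.nodup_cons.mpr ⟨fun hmem => ?_, ih (A ++ [w])⟩
      exact (pv_mem_news.mp hmem).2 (List.mem_append_right _ (List.mem_singleton.mpr rfl))

-- dropping occurrences whose chunks are already absorbed
theorem pv_drop' {α : Type} [BEq α] [LawfulBEq α] (h : α → List α) :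
    ∀ (ws B A : List α), (∀ q ∈ B, ∀ x ∈ h q, x ∈ A) →
      PySem.Set.update A (ws.flatMap h) = PySem.Set.update A ((pvNews B ws).flatMap h) := by
  intro ws
  induction ws with
  | nil =>
    intro B A h
    simp [pvNews, List.drop_length]
  | cons q ws ih =>
    intro B A hh
    by_cases hq : q ∈ B
    · rw [pv_news_cons_mem hq, List.flatMap_cons, pv_upd_append,
          pv_upd_sub A (h q) (hh q hq)]
      exact ih B A hh
    · rw [pv_news_cons_not_mem hq, List.flatMap_cons, List.flatMap_cons,
          pv_upd_append, pv_upd_append]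
      apply ih (B ++ [q])
      intro q' hq' x hx
      rcases List.mem_append.mp hq' with hq' | hq'
      · exact (PySem.Set.mem_update _ _ _).mpr (Or.inl (hh q' hq' x hx))
      · have : q' = q := List.mem_singleton.mp hq'
        subst this
        exact (PySem.Set.mem_update _ _ _).mpr (Or.inr hx)

-- news relative to A = globally fresh sequence filtered by ∉ A
theorem pv_ff {α : Type} [BEq α] [LawfulBEq α] :
    ∀ (ws A B : List α), (∀ x ∈ B, x ∈ A) →
      pvNews A ws = (pvNews B ws).filter (fun x => !A.contains x) := by
  intro ws
  induction ws with
  | nil =>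
    intro A B h
    simp [pvNews, List.drop_length]
  | cons w ws ih =>
    intro A B h
    by_cases hwB : w ∈ B
    · rw [pv_news_cons_mem hwB, pv_news_cons_mem (h w hwB)]
      exact ih A B h
    · by_cases hwA : w ∈ A
      · rw [pv_news_cons_mem hwA, pv_news_cons_not_mem hwB, List.filter_cons]
        have hcw : (!A.contains w) = false := by simp [hwA]
        rw [hcw]
        simp only [Bool.false_eq_true, if_false]
        apply ih A (B ++ [w])
        intro x hx
        rcases List.mem_append.mp hx with hx | hx
        · exact h x hx
        · exact (List.mem_singleton.mp hx) ▸ hwA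
      · rw [pv_news_cons_not_mem hwA, pv_news_cons_not_mem hwB, List.filter_cons]
        have hcw : (!A.contains w) = true := by simp [hwA]
        rw [hcw]
        simp only [if_true]
        congr 1
        rw [ih (A ++ [w]) (B ++ [w]) ?hsub]
        case hsub =>
          intro x hx
          rcases List.mem_append.mp hx with hx | hx
          · exact List.mem_append_left _ (h x hx)
          · exact List.mem_append_right _ hx
        apply List.filter_congr
        intro x hx
        have hxw : x ≠ w := fun hxx =>
          (pv_mem_news.mp hx).2 (hxx ▸ List.mem_append_right _ (List.mem_singleton.mpr rfl))
        simp [List.mem_append, hxw]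

-- ---------- the round operator T ----------

def pvF (d : PySem.Dict String (List String)) (p : String) : List String := d.getD p []

def pvT (d : PySem.Dict String (List String)) (X : List String) : List String :=
  PySem.Set.update X (X.flatMap (pvF d))

def pvTpow (d : PySem.Dict String (List String)) : Nat → List String → List String
  | 0, X => X
  | Nat.succ j, X => pvT d (pvTpow d j X)

def pvUniv (d : PySem.Dict String (List String)) : List String := d.items.flatMap (fun sv => sv.2)

def pvSeg (d : PySem.Dict String (List String)) (V : List String) : Nat → List String
  | 0 => V
  | Nat.succ r => pvNews (pvTpow d r V) ((pvSeg d V r).flatMap (pvF d))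

def pvLim (d : PySem.Dict String (List String)) (ds : List String) : List String :=
  pvTpow d (ds.length + (pvUniv d).length + 1) ds

theorem pv_Tpow_nil (d : PySem.Dict String (List String)) (j : Nat) : pvTpow d j [] = [] := by
  induction j with
  | zero => rfl
  | succ j ih => show pvT d (pvTpow d j []) = []
                 rw [ih]; rfl

theorem pv_mem_T {d : PySem.Dict String (List String)} {X : List String} {x : String} :
    x ∈ pvT d X ↔ x ∈ X ∨ ∃ p ∈ X, x ∈ pvF d p := by
  unfold pvT
  rw [PySem.Set.mem_update, List.mem_flatMap]

theorem pv_Tpow_succ_left (d : PySem.Dict String (List String)) (j : Nat) (X : List String) :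
    pvTpow d (j + 1) X = pvTpow d j (pvT d X) := by
  induction j generalizing X with
  | zero => rfl
  | succ j ih =>
    show pvT d (pvTpow d (j + 1) X) = pvT d (pvTpow d j (pvT d X))
    rw [ih]

theorem pv_Tpow_add (d : PySem.Dict String (List String)) (a b : Nat) (X : List String) :
    pvTpow d (a + b) X = pvTpow d a (pvTpow d b X) := by
  induction a with
  | zero => simp [pvTpow]
  | succ a ih =>
    rw [show a + 1 + b = (a + b) + 1 from by omega]
    show pvT d (pvTpow d (a + b) X) = pvT d (pvTpow d a (pvTpow d b X))
    rw [ih]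

theorem pv_prefix_T (d : PySem.Dict String (List String)) (X : List String) : X <+: pvT d X :=
  pv_upd_prefix _ _

theorem pv_prefix_Tpow (d : PySem.Dict String (List String)) {i j : Nat} (h : i ≤ j) (X : List String) :
    pvTpow d i X <+: pvTpow d j X := by
  obtain ⟨m, rfl⟩ := Nat.exists_eq_add_of_le h
  clear h
  induction m with
  | zero => exact List.prefix_refl _
  | succ m ih =>
    exact ih.trans (pv_prefix_T d (pvTpow d (i + m) X))

theorem pv_mem_Tpow_mono (d : PySem.Dict String (List String)) {i j : Nat} (h : i ≤ j) {X : List String}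
    {x : String} (hx : x ∈ pvTpow d i X) : x ∈ pvTpow d j X :=
  (pv_prefix_Tpow d h X).subset hx

theorem pv_f_sub_T (d : PySem.Dict String (List String)) {X : List String} {p : String} (hp : p ∈ X) :
    ∀ x ∈ pvF d p, x ∈ pvT d X := by
  intro x hx
  exact pv_mem_T.mpr (Or.inr ⟨p, hp, hx⟩)

-- MONO: a k-deep chunk of a member is inside the (k+1)-deep closure
theorem pv_mono (d : PySem.Dict String (List String)) :
    ∀ (k : Nat) (X : List String) (p : String), p ∈ X →
      ∀ x ∈ pvTpow d k (pvF d p), x ∈ pvTpow d (k + 1) X := by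
  intro k
  induction k with
  | zero =>
    intro X p hp x hx
    exact pv_f_sub_T d hp x hx
  | succ k ih =>
    intro X p hp x hx
    rcases pv_mem_T.mp hx with hx | ⟨y, hy, hxy⟩
    · exact pv_mem_Tpow_mono d (Nat.le_succ _) (ih X p hp x hx)
    · exact pv_f_sub_T d (ih X p hp y hy) x hxy

-- ---------- the LM'/SP induction ----------

theorem pv_LM (d : PySem.Dict String (List String)) :
    ∀ (j : Nat) (V : List String),
      pvTpow d (j + 1) V
        = PySem.Set.update (pvTpow d j V) (V.flatMap (fun q => pvTpow d j (pvF d q))) := by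
  intro j
  induction j with
  | zero => intro V; rfl
  | succ j ih =>
    have hSP : ∀ (V A : List String), (∀ x ∈ pvTpow d j V, x ∈ A) →
        PySem.Set.update A (pvTpow d (j + 1) V)
          = PySem.Set.update A (V.flatMap (fun q => pvTpow d j (pvF d q))) := by
      intro V A hA
      rw [ih V, pv_upd_assoc, pv_upd_sub A _ hA]
    have hSPf : ∀ (P A : List String), (∀ q ∈ P, ∀ x ∈ pvTpow d j (pvF d q), x ∈ A) →
        PySem.Set.update A (P.flatMap (fun q => pvTpow d (j + 1) (pvF d q)))
          = PySem.Set.update A (P.flatMap (fun q => (pvF d q).flatMap (fun q' => pvTpow d j (pvF d q')))) := by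
      intro P
      induction P with
      | nil => intro A _; rfl
      | cons q P ihP =>
        intro A hA
        rw [List.flatMap_cons, List.flatMap_cons, pv_upd_append, pv_upd_append,
            hSP (pvF d q) A (fun x hx => hA q List.mem_cons_self x hx)]
        exact ihP _ (fun q' hq' x hx =>
          (PySem.Set.mem_update _ _ _).mpr (Or.inl (hA q' (List.mem_cons_of_mem _ hq') x hx)))
    intro V
    have hsub : ∀ q ∈ V, ∀ x ∈ pvTpow d j (pvF d q), x ∈ pvTpow d (j + 1) V :=
      fun q hq x hx => pv_mono d j V q hq x hx
    rw [hSPf V (pvTpow d (j + 1) V) hsub, ← List.flatMap_assoc,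
        pv_drop' (fun q' => pvTpow d j (pvF d q')) (V.flatMap (pvF d)) V _
          (fun q hq x hx => pv_mono d j V q hq x hx)]
    have hL : pvTpow d (j + 1 + 1) V
        = PySem.Set.update (pvTpow d (j + 1) V) ((pvT d V).flatMap (fun q => pvTpow d j (pvF d q))) := by
      rw [pv_Tpow_succ_left d (j + 1) V, ih (pvT d V), ← pv_Tpow_succ_left d j V]
    rw [hL]
    have hTV : pvT d V = V ++ pvNews V (V.flatMap (pvF d)) := pv_upd_eq_append_news V _
    rw [hTV, List.flatMap_append, pv_upd_append,
        pv_upd_sub (pvTpow d (j + 1) V) _ (fun x hx => by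
          rcases List.mem_flatMap.mp hx with ⟨q, hq, hxq⟩
          exact pv_mono d j V q hq x hxq)]

theorem pv_SP (d : PySem.Dict String (List String)) (j : Nat) (V A : List String)
    (h : ∀ x ∈ pvTpow d j V, x ∈ A) :
    PySem.Set.update A (pvTpow d (j + 1) V)
      = PySem.Set.update A (V.flatMap (fun q => pvTpow d j (pvF d q))) := by
  rw [pv_LM d j V, pv_upd_assoc, pv_upd_sub A _ h]

theorem pv_SPfold (d : PySem.Dict String (List String)) (j : Nat) :
    ∀ (P : List String) (A : List String),
      (∀ q ∈ P, ∀ x ∈ pvTpow d j (pvF d q), x ∈ A) →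
      PySem.Set.update A (P.flatMap (fun q => pvTpow d (j + 1) (pvF d q)))
        = PySem.Set.update A (P.flatMap (fun q => (pvF d q).flatMap (fun q' => pvTpow d j (pvF d q')))) := by
  intro P
  induction P with
  | nil => intro A _; rfl
  | cons q P ihP =>
    intro A hA
    rw [List.flatMap_cons, List.flatMap_cons, pv_upd_append, pv_upd_append,
        pv_SP d j (pvF d q) A (fun x hx => hA q List.mem_cons_self x hx)]
    exact ihP _ (fun q' hq' x hx =>
      (PySem.Set.mem_update _ _ _).mpr (Or.inl (hA q' (List.mem_cons_of_mem _ hq') x hx)))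

-- ---------- segment structure and the cascade ----------

theorem pv_segstr (d : PySem.Dict String (List String)) (V : List String) :
    ∀ (r : Nat),
      pvTpow d (r + 1) V = PySem.Set.update (pvTpow d r V) ((pvSeg d V r).flatMap (pvF d)) := by
  intro r
  induction r with
  | zero => rfl
  | succ r ih =>
    have hsplit : pvTpow d (r + 1) V = pvTpow d r V ++ pvSeg d V (r + 1) := by
      rw [ih, pv_upd_eq_append_news]; rfl
    show pvT d (pvTpow d (r + 1) V) = _
    unfold pvT
    rw [hsplit, List.flatMap_append, pv_upd_append]
    congr 1
    apply pv_upd_sub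
    intro x hx
    rcases List.mem_flatMap.mp hx with ⟨q, hq, hxq⟩
    rw [← hsplit]
    exact pv_f_sub_T d hq x hxq

theorem pv_segstr_append (d : PySem.Dict String (List String)) (V : List String) (r : Nat) :
    pvTpow d (r + 1) V = pvTpow d r V ++ pvSeg d V (r + 1) := by
  rw [pv_segstr d V r, pv_upd_eq_append_news]; rfl

theorem pv_seg_sub (d : PySem.Dict String (List String)) (V : List String) (r : Nat) :
    ∀ x ∈ pvSeg d V r, x ∈ pvTpow d r V := by
  cases r with
  | zero => intro x hx; exact hx
  | succ r =>
    intro x hx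
    rw [pv_segstr_append d V r]
    exact List.mem_append_right _ hx

theorem pv_casc (d : PySem.Dict String (List String)) :
    ∀ (j r : Nat) (V : List String),
      PySem.Set.update (pvTpow d (r + j) V) ((pvSeg d V r).flatMap (fun q => pvTpow d j (pvF d q)))
        = pvTpow d (r + j + 1) V := by
  intro j
  induction j with
  | zero =>
    intro r V
    rw [Nat.add_zero]
    exact (pv_segstr d V r).symm
  | succ j ih =>
    intro r V
    have harith1 : r + (j + 1) = r + j + 1 := by omega
    rw [harith1]
    have hsub : ∀ q ∈ pvTpow d r V, ∀ x ∈ pvTpow d j (pvF d q), x ∈ pvTpow d (r + j + 1) V := by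
      intro q hq x hx
      have hm := pv_mono d j (pvTpow d r V) q hq x hx
      rw [show r + j + 1 = (j + 1) + r from by omega, pv_Tpow_add d (j + 1) r V]
      exact hm
    rw [pv_SPfold d j (pvSeg d V r) _ (fun q hq x hx => hsub q (pv_seg_sub d V r q hq) x hx),
        ← List.flatMap_assoc,
        pv_drop' (fun q' => pvTpow d j (pvF d q')) ((pvSeg d V r).flatMap (pvF d)) (pvTpow d r V) _ hsub]
    have hseg : pvNews (pvTpow d r V) ((pvSeg d V r).flatMap (pvF d)) = pvSeg d V (r + 1) := rfl
    rw [hseg]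
    have hih := ih (r + 1) V
    rw [show r + 1 + j = r + j + 1 from by omega, show r + j + 1 + 1 = r + j + 1 + 1 from rfl] at hih
    exact hih

theorem pv_blocks (d : PySem.Dict String (List String)) (j : Nat) (V : List String) :
    ∀ (r : Nat),
      PySem.Set.update (pvTpow d j V) ((pvTpow d r V).flatMap (fun q => pvTpow d j (pvF d q)))
        = pvTpow d (j + r + 1) V := by
  intro r
  induction r with
  | zero =>
    have hc := pv_casc d j 0 V
    rw [Nat.zero_add] at hc
    rw [Nat.add_zero]
    exact hc
  | succ r ih =>
    rw [pv_segstr_append d V r, List.flatMap_append, pv_upd_append, ih]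
    have hc := pv_casc d j (r + 1) V
    rw [show r + 1 + j = j + r + 1 from by omega, show j + r + 1 + 1 = j + (r + 1) + 1 from by omega] at hc
    exact hc

-- MAIN: one step of A's global squaring, per key
theorem pv_main (d : PySem.Dict String (List String)) (j : Nat) (V : List String) :
    PySem.Set.update (pvTpow d j V) ((pvTpow d j V).flatMap (fun q => pvTpow d j (pvF d q)))
      = pvTpow d (2 * j + 1) V := by
  have hb := pv_blocks d j V j
  rw [show j + j + 1 = 2 * j + 1 from by omega] at hb
  exact hb

-- ---------- stabilisation and the limit ----------

theorem pv_f_sub_univ (d : PySem.Dict String (List String)) (p : String) :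
    ∀ x ∈ pvF d p, x ∈ pvUniv d := by
  intro x hx
  unfold pvF PySem.Dict.getD at hx
  cases hfind : d.get? p with
  | none => rw [hfind] at hx; simp at hx
  | some v =>
    rw [hfind] at hx
    simp only [Option.getD_some] at hx
    unfold PySem.Dict.get? at hfind
    rcases Option.map_eq_some_iff.mp hfind with ⟨sv, hsv, rfl⟩
    exact List.mem_flatMap.mpr ⟨sv, List.mem_of_find?_eq_some hsv, hx⟩

theorem pv_tail_struct (d : PySem.Dict String (List String)) (ds : List String) (j : Nat) :
    ∃ t, pvTpow d j ds = ds ++ t ∧ t.Nodup ∧ ∀ x ∈ t, x ∈ pvUniv d := by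
  induction j with
  | zero => exact ⟨[], by simp [pvTpow], List.nodup_nil, by simp⟩
  | succ j ih =>
    obtain ⟨t, ht, hnd, hsub⟩ := ih
    refine ⟨t ++ pvNews (pvTpow d j ds) ((pvTpow d j ds).flatMap (pvF d)), ?_, ?_, ?_⟩
    · show pvT d (pvTpow d j ds) = _
      unfold pvT
      rw [pv_upd_eq_append_news]
      rw [ht, List.append_assoc]
    · refine List.Nodup.append hnd (pv_news_nodup _ _) ?_
      intro x hxt hxn
      exact (pv_mem_news.mp hxn).2 (by rw [ht]; exact List.mem_append_right _ hxt)
    · intro x hx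
      rcases List.mem_append.mp hx with hx | hx
      · exact hsub x hx
      · rcases List.mem_flatMap.mp (pv_mem_news.mp hx).1 with ⟨q, _, hxq⟩
        exact pv_f_sub_univ d q x hxq

theorem pv_len_bound (d : PySem.Dict String (List String)) (ds : List String) (j : Nat) :
    (pvTpow d j ds).length ≤ ds.length + (pvUniv d).length := by
  obtain ⟨t, ht, hnd, hsub⟩ := pv_tail_struct d ds j
  rw [ht, List.length_append]
  have h1 : t.length = t.toFinset.card := (List.toFinset_card_of_nodup hnd).symm
  have h2 : t.toFinset ⊆ (pvUniv d).toFinset := by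
    intro x hx
    exact List.mem_toFinset.mpr (hsub x (List.mem_toFinset.mp hx))
  have h3 : t.toFinset.card ≤ (pvUniv d).toFinset.card := Finset.card_le_card h2
  have h4 : (pvUniv d).toFinset.card ≤ (pvUniv d).length := List.toFinset_card_le _
  omega

theorem pv_stab_from (d : PySem.Dict String (List String)) {X : List String} (h : pvT d X = X) :
    ∀ k, pvTpow d k X = X := by
  intro k
  induction k with
  | zero => rfl
  | succ k ih =>
    show pvT d (pvTpow d k X) = X
    rw [ih, h]

theorem pv_eq_lim_of_stable (d : PySem.Dict String (List String)) {ds : List String} {j : Nat}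
    (h : pvT d (pvTpow d j ds) = pvTpow d j ds) : pvTpow d j ds = pvLim d ds := by
  have hexists : ∃ i, i < ds.length + (pvUniv d).length + 1 ∧ pvT d (pvTpow d i ds) = pvTpow d i ds := by
    by_contra hc
    push Not at hc
    have hgrow : ∀ i, i ≤ ds.length + (pvUniv d).length + 1 → ds.length + i ≤ (pvTpow d i ds).length := by
      intro i
      induction i with
      | zero => intro _; simp [pvTpow]
      | succ i ih =>
        intro hi
        have h1 := ih (by omega)
        have hne := hc i (by omega)
        have hpre := pv_prefix_T d (pvTpow d i ds)
        have hlt : (pvTpow d i ds).length < (pvT d (pvTpow d i ds)).length := by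
          rcases Nat.lt_or_ge (pvTpow d i ds).length (pvT d (pvTpow d i ds)).length with h | h
          · exact h
          · exact absurd (hpre.eq_of_length (Nat.le_antisymm hpre.length_le h)).symm hne
        have : (pvTpow d (i + 1) ds).length = (pvT d (pvTpow d i ds)).length := rfl
        omega
      
    have := hgrow (ds.length + (pvUniv d).length + 1) (le_refl _)
    have hb := pv_len_bound d ds (ds.length + (pvUniv d).length + 1)
    omega
  obtain ⟨i, hiN, hstabi⟩ := hexists
  have hlim : pvLim d ds = pvTpow d i ds := by
    unfold pvLim
    rw [show ds.length + (pvUniv d).length + 1 = (ds.length + (pvUniv d).length + 1 - i) + i from by omega,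
        pv_Tpow_add]
    exact pv_stab_from d hstabi _
  have hij : pvTpow d (i + j) ds = pvTpow d j ds := by
    rw [pv_Tpow_add]
    exact pv_stab_from d h _
  have hji : pvTpow d (i + j) ds = pvTpow d i ds := by
    rw [show i + j = j + i from by omega, pv_Tpow_add]
    exact pv_stab_from d hstabi _
  rw [hlim, ← hji, hij]

theorem pv_stable_of_eq_double (d : PySem.Dict String (List String)) {ds : List String} {j : Nat}
    (h : pvTpow d (2 * j + 1) ds = pvTpow d j ds) : pvT d (pvTpow d j ds) = pvTpow d j ds := by
  have p1 : pvTpow d j ds <+: pvTpow d (j + 1) ds := pv_prefix_Tpow d (Nat.le_succ _) ds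
  have p2 : pvTpow d (j + 1) ds <+: pvTpow d (2 * j + 1) ds := pv_prefix_Tpow d (by omega) ds
  rw [h] at p2
  have heq : pvTpow d (j + 1) ds = pvTpow d j ds :=
    p2.eq_of_length (Nat.le_antisymm p2.length_le p1.length_le)
  exact heq

theorem pv_seg_empty_lim (d : PySem.Dict String (List String)) {ds : List String} {k : Nat}
    (h : pvSeg d ds k = []) : pvTpow d k ds = pvLim d ds := by
  cases k with
  | zero =>
    have hds : ds = [] := h
    subst hds
    unfold pvLim
    simp [pv_Tpow_nil]
  | succ m =>
    have hsplit := pv_segstr_append d ds m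
    rw [h, List.append_nil] at hsplit
    have hstab : pvT d (pvTpow d m ds) = pvTpow d m ds := hsplit
    have := pv_eq_lim_of_stable d (j := m) hstab
    calc pvTpow d (m + 1) ds = pvTpow d m ds := hsplit
    _ = pvLim d ds := this

-- ---------- dict plumbing ----------

theorem pv_items_ofList (L : List (String × List String)) (h : (L.map Prod.fst).Nodup) :
    (PySem.Dict.ofList L).items = L := by
  unfold PySem.Dict.ofList PySem.Dict.update
  have hfresh : ∀ a ∈ L, (PySem.Dict.empty (κ := String) (ν := List String)).contains a.1 = false :=
    fun a _ => rfl
  have := PySem.Dict.items_foldl_insert_fresh L Prod.fst Prod.snd PySem.Dict.empty hfresh h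
  simpa using this

theorem pv_keys_nodup (l : List (String × List String)) :
    ((PySem.Dict.ofList l).items.map Prod.fst).Nodup := by
  have := PySem.Dict.nodup_keys_foldl_insert_key (ν := List String) l Prod.fst (fun _ x => x.2)
    PySem.Dict.empty (by simp [PySem.Dict.keys, PySem.Dict.empty])
  simpa [PySem.Dict.keys, PySem.Dict.ofList, PySem.Dict.update] using this

-- an `if p in d` guard around a union is redundant: a missing key looks up to []
theorem pv_if_contains (d : PySem.Dict String (List String)) (p : String) (acc : List String) :
    (if d.contains p = true then PySem.Set.update acc (d.getD p []) else acc)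
      = PySem.Set.update acc (d.getD p []) := by
  by_cases h : d.contains p = true
  · rw [if_pos h]
  · rw [if_neg h]
    have hnone : d.get? p = none := by
      unfold PySem.Dict.get?
      cases hf : List.find? (fun sv => sv.1 == p) d.items with
      | none => rfl
      | some sv =>
        exfalso
        have hp := List.find?_some (p := fun (sv : String × List String) => sv.1 == p) hf
        exact h (List.any_eq_true.mpr ⟨sv, List.mem_of_find?_eq_some hf, hp⟩)
    unfold PySem.Dict.getD
    rw [hnone]
    rfl

-- find? over a value-mapped association list
theorem pv_find?_map (L : List (String × List String)) (g : List String → List String) (p : String) :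
    List.find? (fun sv => sv.1 == p) (L.map (fun sv => (sv.1, g sv.2)))
      = Option.map (fun sv => (sv.1, g sv.2)) (List.find? (fun sv => sv.1 == p) L) := by
  induction L with
  | nil => rfl
  | cons a L ih =>
    by_cases h : (a.1 == p) = true
    · simp [h]
    · have hfalse : (a.1 == p) = false := by simpa using h
      simp [hfalse, ih]

-- a dict whose items are key-wise T^j of the base dict looks up to T^j of the base lookup
theorem pv_value_eq (l : List (String × List String)) (j : Nat)
    (pd : PySem.Dict String (List String))
    (hpd : pd.items = (PySem.Dict.ofList l).items.map
      (fun sv => (sv.1, pvTpow (PySem.Dict.ofList l) j sv.2))) (p : String) :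
    pd.getD p [] = pvTpow (PySem.Dict.ofList l) j (pvF (PySem.Dict.ofList l) p) := by
  unfold PySem.Dict.getD PySem.Dict.get? pvF PySem.Dict.getD PySem.Dict.get?
  rw [hpd, pv_find?_map]
  cases hf : List.find? (fun sv => sv.1 == p) (PySem.Dict.ofList l).items with
  | none => simp [pv_Tpow_nil]
  | some sv => simp

-- ---------- A-side ----------

theorem pv_filter_map_foldl {α : Type} [BEq α] (c : α → Bool) (g : α → List α) :
    ∀ (X acc : List α),
      ((X.filter c).map g).foldl PySem.Set.union acc
        = X.foldl (fun a p => if c p then PySem.Set.update a (g p) else a) acc := by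
  intro X
  induction X with
  | nil => intro acc; rfl
  | cons p X ih =>
    intro acc
    by_cases hc : c p = true
    · rw [List.filter_cons, if_pos hc, List.map_cons, List.foldl_cons, List.foldl_cons, if_pos hc]
      exact ih _
    · rw [List.filter_cons, if_neg hc, List.foldl_cons, if_neg hc]
      exact ih _

-- with values T^j of the original, A's reduce computes T^(2j+1)
theorem pv_reduce_eq (l : List (String × List String)) (j : Nat)
    (pd : PySem.Dict String (List String))
    (hpd : pd.items = (PySem.Dict.ofList l).items.map
      (fun sv => (sv.1, pvTpow (PySem.Dict.ofList l) j sv.2))) (ds : List String) :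
    pvReduceA pd (pvTpow (PySem.Dict.ofList l) j ds)
      = pvTpow (PySem.Dict.ofList l) (2 * j + 1) ds := by
  unfold pvReduceA
  rw [pv_filter_map_foldl (fun p => pd.contains p) (fun p => pd.getD p [])]
  have hstep : (fun (a : List String) p => if pd.contains p = true then PySem.Set.update a (pd.getD p []) else a)
      = (fun (a : List String) p => PySem.Set.update a (pvTpow (PySem.Dict.ofList l) j (pvF (PySem.Dict.ofList l) p))) := by
    funext a p
    rw [pv_if_contains, pv_value_eq l j pd hpd]
  rw [hstep, pv_foldl_update, pv_main]

theorem pv_step_items (l : List (String × List String)) (j : Nat)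
    (pd : PySem.Dict String (List String))
    (hpd : pd.items = (PySem.Dict.ofList l).items.map
      (fun sv => (sv.1, pvTpow (PySem.Dict.ofList l) j sv.2))) :
    (pvStepA pd).items = (PySem.Dict.ofList l).items.map
      (fun sv => (sv.1, pvTpow (PySem.Dict.ofList l) (2 * j + 1) sv.2)) := by
  unfold pvStepA
  rw [pv_items_ofList _ (by rw [hpd]
                            simp only [List.map_map]
                            exact pv_keys_nodup l)]
  rw [hpd, List.map_map]
  apply List.map_congr_left
  intro sv _
  show (sv.1, pvReduceA pd (pvTpow (PySem.Dict.ofList l) j sv.2)) = _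
  rw [pv_reduce_eq l j pd hpd]

def pvSZ (l : List (String × List String)) (j : Nat) : Nat :=
  ((PySem.Dict.ofList l).items.map (fun sv => (pvTpow (PySem.Dict.ofList l) j sv.2).length)).sum

def pvSZmax (l : List (String × List String)) : Nat :=
  ((PySem.Dict.ofList l).items.map
    (fun sv => sv.2.length + (pvUniv (PySem.Dict.ofList l)).length)).sum

theorem pv_size_eq (l : List (String × List String)) (j : Nat)
    (pd : PySem.Dict String (List String))
    (hpd : pd.items = (PySem.Dict.ofList l).items.map
      (fun sv => (sv.1, pvTpow (PySem.Dict.ofList l) j sv.2))) :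
    pvSizeA pd = (pvSZ l j : Int) := by
  unfold pvSizeA pvSZ
  have hv : pd.values = pd.items.map (fun sv => sv.2) := rfl
  rw [hv, hpd, List.map_map, List.map_map]
  induction (PySem.Dict.ofList l).items with
  | nil => rfl
  | cons sv L ih =>
    rw [List.map_cons, List.map_cons, List.sum_cons, List.sum_cons, ih]
    push_cast
    rfl

theorem pv_SZ_mono (l : List (String × List String)) {i j : Nat} (h : i ≤ j) : pvSZ l i ≤ pvSZ l j := by
  unfold pvSZ
  apply List.sum_le_sum
  intro sv _
  exact (pv_prefix_Tpow (PySem.Dict.ofList l) h sv.2).length_le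

theorem pv_SZ_le_max (l : List (String × List String)) (j : Nat) : pvSZ l j ≤ pvSZmax l := by
  unfold pvSZ pvSZmax
  apply List.sum_le_sum
  intro sv _
  exact pv_len_bound (PySem.Dict.ofList l) sv.2 j

theorem pv_sum_prefix_eq {β γ : Type} (L : List β) (f g : β → List γ)
    (hp : ∀ sv ∈ L, f sv <+: g sv)
    (hs : (L.map (fun sv => (g sv).length)).sum = (L.map (fun sv => (f sv).length)).sum) :
    ∀ sv ∈ L, g sv = f sv := by
  induction L with
  | nil => intro sv h; cases h
  | cons a L ih =>
    have hfa := (hp a List.mem_cons_self).length_le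
    have htl : (L.map (fun sv => (f sv).length)).sum ≤ (L.map (fun sv => (g sv).length)).sum :=
      List.sum_le_sum (fun sv hsv => (hp sv (List.mem_cons_of_mem _ hsv)).length_le)
    rw [List.map_cons, List.map_cons, List.sum_cons, List.sum_cons] at hs
    have hhead : (g a).length = (f a).length := by omega
    have htail : (L.map (fun sv => (g sv).length)).sum = (L.map (fun sv => (f sv).length)).sum := by
      omega
    intro sv hsv
    rcases List.mem_cons.mp hsv with rfl | hsv
    · exact ((hp sv List.mem_cons_self).eq_of_length hhead.symm).symm
    · exact ih (fun sv hsv => hp sv (List.mem_cons_of_mem _ hsv)) htail sv hsv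

theorem pv_SZ_eq_pointwise (l : List (String × List String)) {i j : Nat} (hij : i ≤ j)
    (h : pvSZ l j = pvSZ l i) :
    ∀ sv ∈ (PySem.Dict.ofList l).items,
      pvTpow (PySem.Dict.ofList l) j sv.2 = pvTpow (PySem.Dict.ofList l) i sv.2 := by
  unfold pvSZ at h
  exact pv_sum_prefix_eq (PySem.Dict.ofList l).items
    (fun sv => pvTpow (PySem.Dict.ofList l) i sv.2)
    (fun sv => pvTpow (PySem.Dict.ofList l) j sv.2)
    (fun sv _ => pv_prefix_Tpow _ hij sv.2) h

theorem pv_loopA_unfold (fuel : Nat) (size : Int) (pd : PySem.Dict String (List String)) :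
    pvLoopA fuel size pd
      = (if pvSizeA (pvStepA pd) == size then pvStepA pd
         else match fuel with
           | 0 => pvStepA pd
           | Nat.succ f => pvLoopA f (pvSizeA (pvStepA pd)) (pvStepA pd)) := by
  cases fuel <;> rfl

theorem pv_loopA_eq (l : List (String × List String)) :
    ∀ (fuel : Nat) (j : Nat) (s : Nat) (pd : PySem.Dict String (List String)),
      pd.items = (PySem.Dict.ofList l).items.map
        (fun sv => (sv.1, pvTpow (PySem.Dict.ofList l) j sv.2)) →
      s ≤ pvSZ l j →
      pvSZmax l + 1 ≤ s + fuel →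
      (pvLoopA fuel (s : Int) pd).items = (PySem.Dict.ofList l).items.map
        (fun sv => (sv.1, pvLim (PySem.Dict.ofList l) sv.2)) := by
  intro fuel
  induction fuel with
  | zero =>
    intro j s pd hpd hs hfuel
    rw [pv_loopA_unfold]
    have hstep := pv_step_items l j pd hpd
    have hsize := pv_size_eq l (2 * j + 1) (pvStepA pd) hstep
    by_cases hex : pvSZ l (2 * j + 1) = s
    · have hcond : (pvSizeA (pvStepA pd) == (s : Int)) = true := by
        rw [hsize, hex]; simp
      rw [if_pos hcond, hstep]
      apply List.map_congr_left
      intro sv hsv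
      have hSZeq : pvSZ l (2 * j + 1) = pvSZ l j := by
        have h2 := pv_SZ_mono l (show j ≤ 2 * j + 1 by omega)
        omega
      have hpoint := pv_SZ_eq_pointwise l (show j ≤ 2 * j + 1 by omega) hSZeq sv hsv
      have hstab := pv_stable_of_eq_double (PySem.Dict.ofList l) (ds := sv.2) (j := j) hpoint
      have hlim := pv_eq_lim_of_stable _ hstab
      rw [hpoint, hlim]
    · exfalso
      have := pv_SZ_le_max l j
      omega
  | succ f ih =>
    intro j s pd hpd hs hfuel
    rw [pv_loopA_unfold]
    have hstep := pv_step_items l j pd hpd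
    have hsize := pv_size_eq l (2 * j + 1) (pvStepA pd) hstep
    by_cases hex : pvSZ l (2 * j + 1) = s
    · have hcond : (pvSizeA (pvStepA pd) == (s : Int)) = true := by
        rw [hsize, hex]; simp
      rw [if_pos hcond, hstep]
      apply List.map_congr_left
      intro sv hsv
      have hSZeq : pvSZ l (2 * j + 1) = pvSZ l j := by
        have h2 := pv_SZ_mono l (show j ≤ 2 * j + 1 by omega)
        omega
      have hpoint := pv_SZ_eq_pointwise l (show j ≤ 2 * j + 1 by omega) hSZeq sv hsv
      have hstab := pv_stable_of_eq_double (PySem.Dict.ofList l) (ds := sv.2) (j := j) hpoint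
      have hlim := pv_eq_lim_of_stable _ hstab
      rw [hpoint, hlim]
    · have hcond : ¬ ((pvSizeA (pvStepA pd) == (s : Int)) = true) := by
        rw [hsize]
        simp only [beq_iff_eq, Nat.cast_inj]
        exact hex
      rw [if_neg hcond, hsize]
      apply ih (2 * j + 1) (pvSZ l (2 * j + 1)) (pvStepA pd) hstep (le_refl _)
      have h2 := pv_SZ_mono l (show j ≤ 2 * j + 1 by omega)
      omega

-- ---------- B-side ----------

theorem pv_bfs_eq (l : List (String × List String)) (ds : List String) :
    ∀ (fuel k : Nat),
      ds.length + (pvUniv (PySem.Dict.ofList l)).length + 2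
        ≤ fuel + (pvTpow (PySem.Dict.ofList l) k ds).length →
      pvBfsB (PySem.Dict.ofList l) fuel (pvTpow (PySem.Dict.ofList l) k ds)
          (pvSeg (PySem.Dict.ofList l) ds k)
        = pvLim (PySem.Dict.ofList l) ds := by
  intro fuel
  induction fuel with
  | zero =>
    intro k hb
    exfalso
    have := pv_len_bound (PySem.Dict.ofList l) ds k
    omega
  | succ f ih =>
    intro k hb
    simp only [pvBfsB]
    by_cases hemp : (pvSeg (PySem.Dict.ofList l) ds k).isEmpty = true
    · rw [if_pos hemp]
      exact pv_seg_empty_lim _ (List.isEmpty_iff.mp hemp)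
    · rw [if_neg hemp]
      have hfn : (fun (a : List String) p =>
            if (PySem.Dict.ofList l).contains p = true
            then PySem.Set.union a ((PySem.Dict.ofList l).getD p []) else a)
          = (fun (a : List String) p => PySem.Set.update a (pvF (PySem.Dict.ofList l) p)) := by
        funext a p
        exact pv_if_contains (PySem.Dict.ofList l) p a
      rw [hfn, pv_foldl_update]
      have hreach : PySem.Set.union (pvTpow (PySem.Dict.ofList l) k ds)
          (PySem.Set.update PySem.Set.empty
            ((pvSeg (PySem.Dict.ofList l) ds k).flatMap (pvF (PySem.Dict.ofList l))))
          = pvTpow (PySem.Dict.ofList l) (k + 1) ds := by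
        show PySem.Set.update _ _ = _
        rw [pv_upd_assoc]
        rw [show PySem.Set.update (pvTpow (PySem.Dict.ofList l) k ds) PySem.Set.empty
              = pvTpow (PySem.Dict.ofList l) k ds from rfl]
        exact (pv_segstr (PySem.Dict.ofList l) ds k).symm
      have hfront : PySem.Set.diff
          (PySem.Set.update PySem.Set.empty
            ((pvSeg (PySem.Dict.ofList l) ds k).flatMap (pvF (PySem.Dict.ofList l))))
          (pvTpow (PySem.Dict.ofList l) k ds) = pvSeg (PySem.Dict.ofList l) ds (k + 1) := by
        have hff := pv_ff ((pvSeg (PySem.Dict.ofList l) ds k).flatMap (pvF (PySem.Dict.ofList l)))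
          (pvTpow (PySem.Dict.ofList l) k ds) [] (by intro x hx; cases hx)
        have hnil : pvNews ([] : List String)
            ((pvSeg (PySem.Dict.ofList l) ds k).flatMap (pvF (PySem.Dict.ofList l)))
            = PySem.Set.update PySem.Set.empty
                ((pvSeg (PySem.Dict.ofList l) ds k).flatMap (pvF (PySem.Dict.ofList l))) := rfl
        rw [hnil] at hff
        exact hff.symm
      rw [hreach, hfront]
      by_cases hseg2 : pvSeg (PySem.Dict.ofList l) ds (k + 1) = []
      · have hfge : 1 ≤ f := by
          have := pv_len_bound (PySem.Dict.ofList l) ds k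
          omega
        obtain ⟨f', rfl⟩ : ∃ f', f = f' + 1 := ⟨f - 1, by omega⟩
        rw [hseg2]
        simp only [pvBfsB]
        rw [if_pos (show ([] : List String).isEmpty = true from rfl)]
        exact pv_seg_empty_lim _ hseg2
      · apply ih (k + 1)
        have hlen : (pvTpow (PySem.Dict.ofList l) (k + 1) ds).length
            = (pvTpow (PySem.Dict.ofList l) k ds).length
              + (pvSeg (PySem.Dict.ofList l) ds (k + 1)).length := by
          rw [pv_segstr_append]
          exact List.length_append
        have hpos : 1 ≤ (pvSeg (PySem.Dict.ofList l) ds (k + 1)).length :=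
          Nat.pos_of_ne_zero (fun h0 => hseg2 (List.eq_nil_of_length_eq_zero h0))
        omega

-- ===== VERDICT (by name: the statement is the Claim_ definition above) =====
theorem get_starting_signs_spec : Claim_equal_get_starting_signs := by
  intro l _
  unfold Spec_get_starting_signs get_starting_signs get_starting_signs_alt
  have hinit : (PySem.Dict.ofList l).items.map
      (fun sv => (sv.1, pvTpow (PySem.Dict.ofList l) 0 sv.2)) = (PySem.Dict.ofList l).items := by
    simp [pvTpow]
  have hfuel : pvSZmax l + 1 ≤ 0 + pvFuelA l := by
    unfold pvSZmax pvFuelA pvUniv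
    omega
  have hA := pv_loopA_eq l (pvFuelA l) 0 0 (PySem.Dict.ofList l) hinit.symm (Nat.zero_le _) hfuel
  rw [show ((0 : Nat) : Int) = (0 : Int) from rfl] at hA
  rw [hA]
  show _ = (PySem.Dict.ofList l).items.map
    (fun sv => (sv.1, pvBfsB (PySem.Dict.ofList l)
      (pvFuelB (PySem.Dict.ofList l) sv.2) sv.2 sv.2))
  apply List.map_congr_left
  intro sv _
  have hb : sv.2.length + (pvUniv (PySem.Dict.ofList l)).length + 2
      ≤ pvFuelB (PySem.Dict.ofList l) sv.2 + (pvTpow (PySem.Dict.ofList l) 0 sv.2).length := by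
    unfold pvFuelB pvUniv
    have h0 : pvTpow (PySem.Dict.ofList l) 0 sv.2 = sv.2 := rfl
    rw [h0]
    omega
  have hB : pvBfsB (PySem.Dict.ofList l) (pvFuelB (PySem.Dict.ofList l) sv.2) sv.2 sv.2
      = pvLim (PySem.Dict.ofList l) sv.2 :=
    pv_bfs_eq l sv.2 (pvFuelB (PySem.Dict.ofList l) sv.2) 0 hb
  rw [hB]
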